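-- pv_equiv track=rewrite | github.com/ekmust2499/python_task | bmp (steganography)/encode.py | main_encoding
-- ===== SOURCE A (Python) =====
-- def main_encoding(encoded: int, byte_in_bmp: int, spent_bits: int,
--                   number_of_encoded_bits: int) -> (int, int):
--     """
--     Coding function in one byte
--     """
--     bits_shift_in_byte = spent_bits - 1
--     while number_of_encoded_bits >= 0 and bits_shift_in_byte >= 0:
--         if ((encoded >> number_of_encoded_bits) & 1) == 1:
--             byte_in_bmp |= 1 << bits_shift_in_byte
--         else:
--             byte_in_bmp &= ~(1 << bits_shift_in_byte)
--         number_of_encoded_bits -= 1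
--         bits_shift_in_byte -= 1
--     return byte_in_bmp, number_of_encoded_bits
-- ===== SOURCE B (Python) =====
-- def main_encoding(encoded: int, byte_in_bmp: int, spent_bits: int,
--                   number_of_encoded_bits: int) -> (int, int):
--     """
--     Coding function in one byte: splice the top n bits of `encoded`
--     (where n is how many bits fit) into the low `spent_bits`-bit field
--     of `byte_in_bmp`, in one closed-form splice.
--     """
--     n = min(spent_bits, number_of_encoded_bits + 1)
--     if n <= 0:
--         return byte_in_bmp, number_of_encoded_bits
--     s = spent_bits - n
--     field = (encoded >> (number_of_encoded_bits - n + 1)) % 2 ** n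
--     high = byte_in_bmp >> spent_bits
--     low = byte_in_bmp % 2 ** s
--     return (high * 2 ** n + field) * 2 ** s + low, number_of_encoded_bits - n
-- ===== Notes on version B (the rewrite author's own statement) =====
-- stated objective: faster
-- what changed: Replaces the bit-by-bit while loop with one closed-form arithmetic splice: compute n = min(spent_bits, number_of_encoded_bits+1) bits to copy, extract that field from encoded with a floor-division and modulus, and rebuild the byte from its high part, the field and its low part in O(1) arithmetic operations.
import Mathlib
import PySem

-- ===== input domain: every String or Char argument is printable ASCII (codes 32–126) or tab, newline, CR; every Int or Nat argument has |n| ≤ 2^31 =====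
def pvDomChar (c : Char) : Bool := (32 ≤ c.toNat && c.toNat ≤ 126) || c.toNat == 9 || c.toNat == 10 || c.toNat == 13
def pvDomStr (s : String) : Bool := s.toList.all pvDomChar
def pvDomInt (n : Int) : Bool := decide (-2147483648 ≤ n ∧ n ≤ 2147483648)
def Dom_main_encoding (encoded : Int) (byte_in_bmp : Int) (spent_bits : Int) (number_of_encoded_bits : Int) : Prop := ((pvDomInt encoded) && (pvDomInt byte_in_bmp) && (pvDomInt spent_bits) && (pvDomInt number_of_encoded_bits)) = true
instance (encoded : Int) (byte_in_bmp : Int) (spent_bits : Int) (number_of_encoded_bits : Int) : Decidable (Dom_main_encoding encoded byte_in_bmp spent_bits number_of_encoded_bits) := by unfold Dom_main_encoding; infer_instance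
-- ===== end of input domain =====

-- ===== PORT A =====
-- Transliteration of A's while loop; Python `>>`/`<<` are `>>>`/`<<<` with Nat
-- shift counts (nonnegative whenever the loop body runs), `&`/`|`/`~` are
-- PySem.Int.band / PySem.Int.bor / Int.not.
def pvLoopA (encoded : Int) (byte_in_bmp : Int) (number_of_encoded_bits : Int) (bits_shift_in_byte : Int) : Int × Int :=
  if h : 0 ≤ number_of_encoded_bits ∧ 0 ≤ bits_shift_in_byte then
    pvLoopA encoded
      (if PySem.Int.band (encoded >>> number_of_encoded_bits.toNat) 1 = 1 then
         PySem.Int.bor byte_in_bmp ((1 : Int) <<< bits_shift_in_byte.toNat)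
       else
         PySem.Int.band byte_in_bmp (Int.not ((1 : Int) <<< bits_shift_in_byte.toNat)))
      (number_of_encoded_bits - 1) (bits_shift_in_byte - 1)
  else (byte_in_bmp, number_of_encoded_bits)
termination_by (number_of_encoded_bits + 1).toNat
decreasing_by omega

def main_encoding (encoded : Int) (byte_in_bmp : Int) (spent_bits : Int) (number_of_encoded_bits : Int) : Int × Int :=
  pvLoopA encoded byte_in_bmp number_of_encoded_bits (spent_bits - 1)

-- ===== PORT B =====
-- Transliteration of Source B: one closed-form splice (`>>` is `>>>` with a Nat
-- shift count, `%` is PySem.Int.mod; `2 ** k` is `(2 : Int) ^ k.toNat`, exact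
-- here because every shift count / exponent taken is nonnegative in this branch).
def main_encoding_alt (encoded : Int) (byte_in_bmp : Int) (spent_bits : Int) (number_of_encoded_bits : Int) : Int × Int :=
  let n := min spent_bits (number_of_encoded_bits + 1)
  if n ≤ 0 then (byte_in_bmp, number_of_encoded_bits)
  else
    let s := spent_bits - n
    let field := PySem.Int.mod (encoded >>> (number_of_encoded_bits - n + 1).toNat) ((2 : Int) ^ n.toNat)
    let high := byte_in_bmp >>> spent_bits.toNat
    let low := PySem.Int.mod byte_in_bmp ((2 : Int) ^ s.toNat)
    ((high * 2 ^ n.toNat + field) * 2 ^ s.toNat + low, number_of_encoded_bits - n)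

-- ===== PRECONDITION & SPEC =====
def Spec_main_encoding (encoded : Int) (byte_in_bmp : Int) (spent_bits : Int) (number_of_encoded_bits : Int) (out : Int × Int) : Prop := out = main_encoding_alt encoded byte_in_bmp spent_bits number_of_encoded_bits
instance (encoded : Int) (byte_in_bmp : Int) (spent_bits : Int) (number_of_encoded_bits : Int) (out : Int × Int) : Decidable (Spec_main_encoding encoded byte_in_bmp spent_bits number_of_encoded_bits out) := by unfold Spec_main_encoding; infer_instance

-- ===== CLAIM (what is proved, stated in full; the proofs are below) =====
def Claim_equal_main_encoding : Prop := ∀ (encoded : Int) (byte_in_bmp : Int) (spent_bits : Int) (number_of_encoded_bits : Int), Dom_main_encoding encoded byte_in_bmp spent_bits number_of_encoded_bits → Spec_main_encoding encoded byte_in_bmp spent_bits number_of_encoded_bits (main_encoding encoded byte_in_bmp spent_bits number_of_encoded_bits)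

-- ===== LEMMAS AND PROOFS =====

-- the closed-form value the loop computes, indexed by Nat-valued arguments
def pvSplice (e b : Int) (N K : ℕ) : Int × Int :=
  ((b / 2 ^ (K + 1) * 2 ^ (min N K + 1) + e / 2 ^ (N - min N K) % 2 ^ (min N K + 1)) * 2 ^ (K - min N K)
     + b % 2 ^ (K - min N K),
   (N : Int) - (min N K : ℕ) - 1)

lemma shr_pow (a : Int) (t : ℕ) : a >>> t = a / (2 : Int) ^ t := by
  rw [Int.shiftRight_eq_div_pow]; norm_cast

lemma pv_mod_pow (a : Int) (k : ℕ) : PySem.Int.mod a ((2 : Int) ^ k) = a % 2 ^ k := by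
  have h : (0 : Int) ≤ 2 ^ k := by positivity
  simp [PySem.Int.mod, Int.fmod_eq_emod, h]

lemma int_not_eq (x : Int) : Int.not x = -x - 1 := by
  cases x with
  | ofNat n => simp [Int.not, Int.negSucc_eq]; try omega
  | negSucc n => simp [Int.not, Int.negSucc_eq]; try omega

lemma one_shl (K : ℕ) : (1 : Int) <<< K = ((2 ^ K : ℕ) : Int) := by
  show Int.shiftLeft 1 K = _
  simp [Int.shiftLeft, Nat.shiftLeft_eq]

lemma nat_decomp (m K : ℕ) : m = (2 * (m / 2 ^ (K + 1)) + m / 2 ^ K % 2) * 2 ^ K + m % 2 ^ K := by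
  have h3 : m / 2 ^ K / 2 = m / 2 ^ (K + 1) := by rw [Nat.div_div_eq_div_mul, pow_succ]
  rw [← h3]
  have h1 := Nat.div_add_mod m (2 ^ K)
  have h2 := Nat.div_add_mod (m / 2 ^ K) 2
  rw [h2]
  linarith [h1]

lemma nat_and_pow (m K : ℕ) : m &&& 2 ^ K = m / 2 ^ K % 2 * 2 ^ K := by
  rw [Nat.and_two_pow]
  rcases Nat.mod_two_eq_zero_or_one (m / 2 ^ K) with h | h
  · simp [Nat.testBit_eq_decide_div_mod_eq, h]
  · simp [Nat.testBit_eq_decide_div_mod_eq, h]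

lemma nat_or_pow : ∀ (K m : ℕ), m ||| 2 ^ K = m / 2 ^ (K + 1) * 2 ^ (K + 1) + 2 ^ K + m % 2 ^ K := by
  intro K
  induction K with
  | zero =>
    intro m
    obtain ⟨b, x, hm⟩ : ∃ b x, m = Nat.bit b x := ⟨m.bodd, m.div2, (Nat.bit_bodd_div2 m).symm⟩
    subst hm
    have ht : b.toNat < 2 := Bool.toNat_lt b
    have hOr : Nat.bit b x ||| 2 ^ 0 = Nat.bit true x := by
      rw [show (2 : ℕ) ^ 0 = Nat.bit true 0 by simp [Nat.bit_val], Nat.lor_bit]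
      simp
    rw [hOr, Nat.bit_val, Nat.bit_val]
    simp only [pow_zero, Nat.mod_one, Bool.toNat_true]
    omega
  | succ k ih =>
    intro m
    obtain ⟨b, x, hm⟩ : ∃ b x, m = Nat.bit b x := ⟨m.bodd, m.div2, (Nat.bit_bodd_div2 m).symm⟩
    subst hm
    have ht : b.toNat < 2 := Bool.toNat_lt b
    have hOr : Nat.bit b x ||| 2 ^ (k + 1) = 2 * (x ||| 2 ^ k) + b.toNat := by
      rw [show (2 : ℕ) ^ (k + 1) = Nat.bit false (2 ^ k) by simp [Nat.bit_val]; ring, Nat.lor_bit]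
      simp [Nat.bit_val]
    have hd : Nat.bit b x / 2 ^ (k + 1 + 1) = x / 2 ^ (k + 1) := by
      rw [Nat.bit_val, show (2 : ℕ) ^ (k + 1 + 1) = 2 * 2 ^ (k + 1) by ring,
        ← Nat.div_div_eq_div_mul, show (2 * x + b.toNat) / 2 = x by omega]
    have hm2 : Nat.bit b x % 2 ^ (k + 1) = b.toNat + 2 * (x % 2 ^ k) := by
      rw [Nat.bit_val, show (2 : ℕ) ^ (k + 1) = 2 * 2 ^ k by ring, Nat.mod_mul,
        show (2 * x + b.toNat) % 2 = b.toNat by omega, show (2 * x + b.toNat) / 2 = x by omega]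
    rw [hOr, ih x, hd, hm2]
    ring

lemma int_neg_div (m q : ℕ) (hq : 0 < q) :
    (-(m : Int) - 1) / (q : ℕ) = -((m / q : ℕ) : Int) - 1 ∧
    (-(m : Int) - 1) % (q : ℕ) = (q : Int) - 1 - ((m % q : ℕ) : Int) := by
  have hq' : (0 : Int) < (q : ℕ) := by exact_mod_cast hq
  have h := Nat.div_add_mod m q
  have h' : ((q : Int)) * ((m / q : ℕ) : Int) + ((m % q : ℕ) : Int) = (m : Int) := by exact_mod_cast h
  have hlt : ((m % q : ℕ) : Int) < (q : Int) := by exact_mod_cast Nat.mod_lt m hq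
  have hnn : (0 : Int) ≤ ((m % q : ℕ) : Int) := by positivity
  exact (Int.ediv_emod_unique hq').mpr ⟨by linarith, by linarith, by linarith⟩

-- set bit K / clear bit K, arithmetically
lemma nat_and_le (m K : ℕ) : m / 2 ^ K % 2 * 2 ^ K ≤ m :=
  le_trans (Nat.mul_le_mul_right _ (Nat.mod_le _ _)) (Nat.div_mul_le_self m (2 ^ K))

lemma nat_decomp_int (m K : ℕ) :
    ((m : ℕ) : Int) = (2 * ((m : Int) / 2 ^ (K + 1)) + (m : Int) / 2 ^ K % 2) * 2 ^ K + (m : Int) % 2 ^ K := by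
  have h := nat_decomp m K
  exact_mod_cast congrArg (fun t => ((t : ℕ) : Int)) h

lemma int_setbit (b : Int) (K : ℕ) :
    PySem.Int.bor b ((1 : Int) <<< K) = (b / 2 ^ (K + 1) * 2 + 1) * 2 ^ K + b % 2 ^ K := by
  rw [one_shl]
  rcases (by omega : 0 ≤ b ∨ b < 0) with h | h
  · obtain ⟨m, rfl⟩ : ∃ m : ℕ, b = (m : Int) := ⟨b.toNat, (Int.toNat_of_nonneg h).symm⟩
    unfold PySem.Int.bor
    rw [if_pos (by positivity), if_pos (by positivity)]
    simp only [Int.toNat_natCast]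
    rw [nat_or_pow K m]
    push_cast
    ring
  · obtain ⟨m, rfl⟩ : ∃ m : ℕ, b = -(m : Int) - 1 := ⟨(-b - 1).toNat, by omega⟩
    unfold PySem.Int.bor
    rw [if_neg (by omega), if_pos (by positivity)]
    have e1 : (-(-(m : Int) - 1) - 1).toNat = m := by omega
    rw [e1, Int.toNat_natCast, nat_and_pow]
    obtain ⟨hd, -⟩ := int_neg_div m (2 ^ (K + 1)) (by positivity)
    obtain ⟨-, hr⟩ := int_neg_div m (2 ^ K) (by positivity)
    push_cast [Nat.cast_sub (nat_and_le m K)] at hd hr ⊢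
    rw [hd, hr]
    have hdec := nat_decomp_int m K
    push_cast at hdec
    linarith [hdec]

lemma int_clrbit (b : Int) (K : ℕ) :
    PySem.Int.band b (Int.not ((1 : Int) <<< K)) = b / 2 ^ (K + 1) * 2 * 2 ^ K + b % 2 ^ K := by
  rw [one_shl, int_not_eq]
  rcases (by omega : 0 ≤ b ∨ b < 0) with h | h
  · obtain ⟨m, rfl⟩ : ∃ m : ℕ, b = (m : Int) := ⟨b.toNat, (Int.toNat_of_nonneg h).symm⟩
    unfold PySem.Int.band
    have hP1 : 1 ≤ ((2 ^ K : ℕ) : Int) := by exact_mod_cast Nat.one_le_two_pow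
    rw [if_pos (by positivity), if_neg (by intro hcon; linarith)]
    have e1 : (-(-((2 ^ K : ℕ) : Int) - 1) - 1).toNat = 2 ^ K := by
      rw [show -(-((2 ^ K : ℕ) : Int) - 1) - 1 = ((2 ^ K : ℕ) : Int) by ring, Int.toNat_natCast]
    rw [e1, Int.toNat_natCast, nat_and_pow]
    push_cast [Nat.cast_sub (nat_and_le m K)]
    have hdec := nat_decomp_int m K
    push_cast at hdec
    linarith [hdec]
  · obtain ⟨m, rfl⟩ : ∃ m : ℕ, b = -(m : Int) - 1 := ⟨(-b - 1).toNat, by omega⟩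
    unfold PySem.Int.band
    have hP1 : 1 ≤ ((2 ^ K : ℕ) : Int) := by exact_mod_cast Nat.one_le_two_pow
    rw [if_neg (by omega), if_neg (by intro hcon; linarith)]
    have e1 : (-(-(m : Int) - 1) - 1).toNat = m := by omega
    have e2 : (-(-((2 ^ K : ℕ) : Int) - 1) - 1).toNat = 2 ^ K := by
      rw [show -(-((2 ^ K : ℕ) : Int) - 1) - 1 = ((2 ^ K : ℕ) : Int) by ring, Int.toNat_natCast]
    rw [e1, e2, nat_or_pow]
    obtain ⟨hd, -⟩ := int_neg_div m (2 ^ (K + 1)) (by positivity)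
    obtain ⟨-, hr⟩ := int_neg_div m (2 ^ K) (by positivity)
    push_cast at hd hr ⊢
    rw [hd, hr]
    ring

lemma step_eq (e b : Int) (N K : ℕ) :
    (if PySem.Int.band (e >>> N) 1 = 1 then PySem.Int.bor b ((1 : Int) <<< K)
     else PySem.Int.band b (Int.not ((1 : Int) <<< K)))
    = (b / 2 ^ (K + 1) * 2 + e / 2 ^ N % 2) * 2 ^ K + b % 2 ^ K := by
  have hc : PySem.Int.band (e >>> N) 1 = e / 2 ^ N % 2 := by
    rw [PySem.Int.band_one, Int.shiftRight_eq_div_pow]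
    have h : (0 : Int) ≤ 2 := by norm_num
    simp [PySem.Int.mod, Int.fmod_eq_emod, h]
  rcases Int.emod_two_eq (e / 2 ^ N) with h | h
  · rw [hc, h, if_neg (by norm_num), int_clrbit]; try ring
  · rw [hc, h, if_pos rfl, int_setbit]; try ring

lemma int_mod_split (x : Int) (c : ℕ) : x % 2 ^ (c + 1) = x / 2 ^ c % 2 * 2 ^ c + x % 2 ^ c := by
  have hP : (0 : Int) < 2 ^ c := by positivity
  have d1 : x / 2 ^ c / 2 = x / 2 ^ (c + 1) := by
    rw [Int.ediv_ediv_of_nonneg (le_of_lt hP), ← pow_succ]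
  have e1 := Int.mul_ediv_add_emod x (2 ^ c)
  have e2 := Int.mul_ediv_add_emod (x / 2 ^ c) 2
  rw [d1] at e2
  have hrepr : x = x / 2 ^ c % 2 * 2 ^ c + x % 2 ^ c + 2 ^ (c + 1) * (x / 2 ^ (c + 1)) := by
    linear_combination -e1 - 2 ^ c * e2
  have hnn : 0 ≤ x % 2 ^ c := Int.emod_nonneg x (by positivity)
  have hlt : x % 2 ^ c < 2 ^ c := Int.emod_lt_of_pos x hP
  calc x % 2 ^ (c + 1)
      = (x / 2 ^ c % 2 * 2 ^ c + x % 2 ^ c + 2 ^ (c + 1) * (x / 2 ^ (c + 1))) % 2 ^ (c + 1) := by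
        conv_lhs => rw [hrepr]
    _ = (x / 2 ^ c % 2 * 2 ^ c + x % 2 ^ c) % 2 ^ (c + 1) := by rw [Int.add_mul_emod_self_left]
    _ = x / 2 ^ c % 2 * 2 ^ c + x % 2 ^ c := by
        apply Int.emod_eq_of_lt
        · rcases Int.emod_two_eq (x / 2 ^ c) with hb | hb <;> rw [hb] <;> linarith
        · rcases Int.emod_two_eq (x / 2 ^ c) with hb | hb <;> rw [hb, pow_succ] <;> linarith

lemma pv_comp (e b : Int) (n k : ℕ) :
    pvSplice e ((b / 2 ^ (k + 1 + 1) * 2 + e / 2 ^ (n + 1) % 2) * 2 ^ (k + 1) + b % 2 ^ (k + 1)) n k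
      = pvSplice e b (n + 1) (k + 1) := by
  have hP : (0 : Int) < 2 ^ (k + 1) := by positivity
  set Q : Int := b / 2 ^ (k + 1 + 1) * 2 + e / 2 ^ (n + 1) % 2 with hQ
  have hnn : 0 ≤ b % 2 ^ (k + 1) := Int.emod_nonneg b (by positivity)
  have hlt : b % 2 ^ (k + 1) < 2 ^ (k + 1) := Int.emod_lt_of_pos b hP
  have hdiv : (Q * 2 ^ (k + 1) + b % 2 ^ (k + 1)) / 2 ^ (k + 1) = Q := by
    rw [add_comm, Int.add_mul_ediv_right _ _ (ne_of_gt hP),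
      Int.ediv_eq_zero_of_lt hnn hlt, zero_add]
  have hmod : (Q * 2 ^ (k + 1) + b % 2 ^ (k + 1)) % 2 ^ (k - min n k) = b % 2 ^ (k - min n k) := by
    obtain ⟨t, ht⟩ : (2 : Int) ^ (k - min n k) ∣ 2 ^ (k + 1) := pow_dvd_pow 2 (by omega)
    calc (Q * 2 ^ (k + 1) + b % 2 ^ (k + 1)) % 2 ^ (k - min n k)
        = (b % 2 ^ (k + 1) + 2 ^ (k - min n k) * (Q * t)) % 2 ^ (k - min n k) := by
          rw [ht]; ring_nf
      _ = b % 2 ^ (k + 1) % 2 ^ (k - min n k) := by rw [Int.add_mul_emod_self_left]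
      _ = b % 2 ^ (k - min n k) := Int.emod_emod_of_dvd b (pow_dvd_pow 2 (by omega))
  have hfield : e / 2 ^ (n - min n k) / 2 ^ (min n k + 1) = e / 2 ^ (n + 1) := by
    rw [Int.ediv_ediv_of_nonneg (by positivity), ← pow_add,
      show n - min n k + (min n k + 1) = n + 1 by omega]
  unfold pvSplice
  rw [Nat.succ_min_succ, Nat.succ_sub_succ, Nat.succ_sub_succ]
  simp only [Nat.succ_eq_add_one, Prod.mk.injEq]
  constructor
  · rw [hdiv, hmod, int_mod_split (e / 2 ^ (n - min n k)) (min n k + 1), hfield, hQ]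
    ring
  · push_cast
    ring

lemma loop_eq (e : Int) : ∀ (N K : ℕ) (b : Int), pvLoopA e b (N : ℕ) (K : ℕ) = pvSplice e b N K := by
  intro N
  induction N with
  | zero =>
    intro K b
    rw [pvLoopA, dif_pos ⟨by positivity, by positivity⟩]
    simp only [Int.toNat_natCast]
    rw [pvLoopA, dif_neg (by omega), step_eq e b 0 K]
    unfold pvSplice
    simp only [Nat.zero_min, Nat.sub_zero, Nat.sub_self, pow_zero, Prod.mk.injEq]
    refine ⟨by norm_num, by push_cast; try ring⟩
  | succ n ih =>
    intro K b
    cases K with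
    | zero =>
      rw [pvLoopA, dif_pos ⟨by positivity, by positivity⟩]
      simp only [Int.toNat_natCast]
      rw [pvLoopA, dif_neg (by omega), step_eq e b (n + 1) 0]
      unfold pvSplice
      simp only [Nat.min_zero, Nat.sub_zero, Nat.sub_self, pow_zero, Prod.mk.injEq]
      refine ⟨by norm_num, by push_cast; try ring⟩
    | succ k =>
      rw [pvLoopA, dif_pos ⟨by positivity, by positivity⟩]
      simp only [Int.toNat_natCast]
      have a1 : ((n + 1 : ℕ) : Int) - 1 = ((n : ℕ) : Int) := by push_cast; ring
      have a2 : ((k + 1 : ℕ) : Int) - 1 = ((k : ℕ) : Int) := by push_cast; ring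
      rw [a1, a2, ih, step_eq e b (n + 1) (k + 1)]
      exact pv_comp e b n k

lemma alt_eq (e b sb noe : Int) (hs : 1 ≤ sb) (hn : 0 ≤ noe) :
    main_encoding_alt e b sb noe = pvSplice e b noe.toNat (sb - 1).toNat := by
  have hK : (((sb - 1).toNat : ℕ) : Int) = sb - 1 := Int.toNat_of_nonneg (by omega)
  have hN : ((noe.toNat : ℕ) : Int) = noe := Int.toNat_of_nonneg hn
  have hmin0 : 1 ≤ min sb (noe + 1) := le_min hs (by omega)
  simp only [main_encoding_alt]
  rw [if_neg (by omega), shr_pow, shr_pow, pv_mod_pow, pv_mod_pow]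
  have e1 : sb.toNat = (sb - 1).toNat + 1 := by omega
  have e2 : (min sb (noe + 1)).toNat = min noe.toNat (sb - 1).toNat + 1 := by omega
  have e3 : (noe - min sb (noe + 1) + 1).toNat = noe.toNat - min noe.toNat (sb - 1).toNat := by omega
  have e4 : (sb - min sb (noe + 1)).toNat = (sb - 1).toNat - min noe.toNat (sb - 1).toNat := by omega
  have e5 : noe - min sb (noe + 1)
      = ((noe.toNat : ℕ) : Int) - ((min noe.toNat (sb - 1).toNat : ℕ) : Int) - 1 := by
    push_cast
    omega
  rw [e1, e2, e3, e4, e5]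
  rfl

-- ===== VERDICT (by name: the statement is the Claim_ definition above) =====
theorem main_encoding_spec : Claim_equal_main_encoding := by
  intro e b sb noe _
  unfold Spec_main_encoding main_encoding
  by_cases hn : 0 ≤ noe
  · by_cases hs : 1 ≤ sb
    · have h1 : noe = ((noe.toNat : ℕ) : Int) := (Int.toNat_of_nonneg hn).symm
      have h2 : sb - 1 = (((sb - 1).toNat : ℕ) : Int) := (Int.toNat_of_nonneg (by omega)).symm
      rw [alt_eq e b sb noe hs hn]
      conv_lhs => rw [h1, h2]
      rw [loop_eq]
    · rw [pvLoopA, dif_neg (by omega)]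
      unfold main_encoding_alt
      rw [if_pos (le_trans (min_le_left _ _) (by omega))]
  · rw [pvLoopA, dif_neg (by omega)]
    unfold main_encoding_alt
    rw [if_pos (le_trans (min_le_right _ _) (by omega))]
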